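-- pv_equiv track=rewrite | github.com/ajayjohn/tars-work-assistant | scripts/update-reference.py | extract_preserve_fields
-- ===== SOURCE A (Python) =====
-- def extract_preserve_fields(content, field_prefixes):
--     """Extract field values to preserve from workspace content, in order.
--
--     Returns a dict of {prefix: [value1, value2, ...]} where values are
--     ordered by their appearance in the file. Multiple occurrences of the
--     same prefix are all captured (e.g., multiple 'status:' fields).
--     """
--     preserved = {prefix: [] for prefix in field_prefixes}
--     for line in content.split("\n"):
--         stripped = line.strip()
--         for prefix in field_prefixes:
--             if stripped.startswith(prefix):
--                 preserved[prefix].append(stripped)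
--     return preserved
-- ===== SOURCE B (Python) =====
-- def extract_preserve_fields(content, field_prefixes):
--     """Extract field values to preserve from workspace content, in order."""
--     # Index the prefixes by their first character once, so each line only
--     # tests the prefixes that can possibly match it (plus empty prefixes).
--     by_first = {}
--     for prefix in field_prefixes:
--         by_first.setdefault(prefix[:1], []).append(prefix)
--     preserved = {prefix: [] for prefix in field_prefixes}
--     for line in content.split("\n"):
--         stripped = line.strip()
--         candidates = by_first.get("", [])
--         if stripped:
--             candidates = candidates + by_first.get(stripped[:1], [])
--         for prefix in candidates:
--             if stripped.startswith(prefix):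
--                 preserved[prefix].append(stripped)
--     return preserved
-- ===== Notes on version B (the rewrite author's own statement) =====
-- stated objective: alternative
-- what changed: B builds a first-character index of the prefixes once (a dict char->prefixes) so each line only tests the candidate prefixes sharing its first character (plus empty prefixes), instead of A's inner scan over the whole prefix list for every line.
import Mathlib
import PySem

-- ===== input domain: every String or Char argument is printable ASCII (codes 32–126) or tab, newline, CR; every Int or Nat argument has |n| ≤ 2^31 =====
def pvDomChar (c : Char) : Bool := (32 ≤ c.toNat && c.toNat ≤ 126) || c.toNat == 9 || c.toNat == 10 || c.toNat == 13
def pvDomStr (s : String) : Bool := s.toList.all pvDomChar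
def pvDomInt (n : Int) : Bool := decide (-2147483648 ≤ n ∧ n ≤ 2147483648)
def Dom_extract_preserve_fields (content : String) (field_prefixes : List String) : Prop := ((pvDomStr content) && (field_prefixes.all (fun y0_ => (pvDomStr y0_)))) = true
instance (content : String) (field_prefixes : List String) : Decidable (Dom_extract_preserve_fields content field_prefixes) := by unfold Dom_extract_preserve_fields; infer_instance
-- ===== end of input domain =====

-- B builds a first-character index of the prefixes once, so each line only tests
-- the prefixes that can possibly match it (those sharing its first character,
-- plus the empty prefixes), instead of A's inner scan over all prefixes per line.

-- ===== PORT A =====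
def extract_preserve_fields (content : String) (field_prefixes : List String) : List (String × List String) :=
  let preserved : PySem.Dict String (List String) :=
    field_prefixes.foldl (fun d p => d.insert p []) PySem.Dict.empty
  let final :=
    ((PySem.Str.split? content "\n").getD []).foldl
      (fun d line =>
        let stripped := PySem.Str.strip line
        field_prefixes.foldl
          (fun d p =>
            if PySem.Str.startswith stripped p then
              d.modify p [] (fun vs => vs ++ [stripped])
            else d) d)
      preserved
  final.items

-- ===== PORT B =====
-- candidate prefixes for a stripped line: the empty-prefix group, plus the
-- group of prefixes sharing the line's first character (Python stripped[:1])
def pvCands (by_first : PySem.Dict String (List String)) (stripped : String) : List String :=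
  let candidates := by_first.getD "" []
  if stripped ≠ "" then candidates ++ by_first.getD (PySem.Str.slice stripped (some 0) (some 1)) []
  else candidates

def extract_preserve_fields_alt (content : String) (field_prefixes : List String) : List (String × List String) :=
  let by_first : PySem.Dict String (List String) :=
    field_prefixes.foldl
      (fun d p => d.modify (PySem.Str.slice p (some 0) (some 1)) [] (fun vs => vs ++ [p]))
      PySem.Dict.empty
  let preserved : PySem.Dict String (List String) :=
    field_prefixes.foldl (fun d p => d.insert p []) PySem.Dict.empty
  let final :=
    ((PySem.Str.split? content "\n").getD []).foldl
      (fun d line =>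
        let stripped := PySem.Str.strip line
        (pvCands by_first stripped).foldl
          (fun d p =>
            if PySem.Str.startswith stripped p then
              d.modify p [] (fun vs => vs ++ [stripped])
            else d) d)
      preserved
  final.items

-- ===== PRECONDITION & SPEC =====
def Spec_extract_preserve_fields (content : String) (field_prefixes : List String) (out : List (String × List String)) : Prop := out = extract_preserve_fields_alt content field_prefixes
instance (content : String) (field_prefixes : List String) (out : List (String × List String)) : Decidable (Spec_extract_preserve_fields content field_prefixes out) := by unfold Spec_extract_preserve_fields; infer_instance

-- ===== CLAIM (what is proved, stated in full; the proofs are below) =====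
def Claim_equal_extract_preserve_fields : Prop := ∀ (content : String) (field_prefixes : List String), Dom_extract_preserve_fields content field_prefixes → Spec_extract_preserve_fields content field_prefixes (extract_preserve_fields content field_prefixes)

-- ===== LEMMAS AND PROOFS =====

-- a fold of inserts never touching key p leaves p's lookup unchanged
theorem pvFoldInsert_getD_of_not_mem (v : String → List String) (p : String) :
    ∀ (fps : List String) (d : PySem.Dict String (List String)), p ∉ fps →
      (fps.foldl (fun d q => d.insert q (v q)) d).getD p [] = d.getD p [] := by
  intro fps
  induction fps with
  | nil => intro d _; simp
  | cons q rest ih =>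
    intro d hp
    simp only [List.foldl_cons]
    rw [ih _ (fun h => hp (List.mem_cons_of_mem _ h)),
      PySem.Dict.getD_insert_of_ne _ _ _ (by intro h; subst h; exact hp List.mem_cons_self)]

-- a fold of inserts whose value depends only on the key: last insert wins, all agree
theorem pvFoldInsert_getD (v : String → List String) (p : String) :
    ∀ (fps : List String) (d : PySem.Dict String (List String)), p ∈ fps →
      (fps.foldl (fun d q => d.insert q (v q)) d).getD p [] = v p := by
  intro fps
  induction fps with
  | nil => intro d h; simp at h
  | cons q rest ih =>
    intro d hp
    simp only [List.foldl_cons]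
    by_cases hr : p ∈ rest
    · exact ih _ hr
    · have hpq : p = q := by
        rcases List.mem_cons.mp hp with h | h
        · exact h
        · exact absurd h hr
      subst hpq
      rw [pvFoldInsert_getD_of_not_mem v p rest _ hr, PySem.Dict.getD_insert_self]

-- grouping fold: the bucket of key c collects, in order, the elements whose key is c
theorem pvGroup_getD (key : String → String) (c : String) :
    ∀ (fps : List String) (d : PySem.Dict String (List String)),
      (fps.foldl (fun d p => d.modify (key p) [] (fun vs => vs ++ [p])) d).getD c []
        = d.getD c [] ++ fps.filter (fun p => key p == c) := by
  intro fps
  induction fps with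
  | nil => intro d; simp
  | cons q rest ih =>
    intro d
    simp only [List.foldl_cons, List.filter_cons]
    rw [ih]
    by_cases h : key q = c
    · subst h
      simp [PySem.Dict.getD_modify_self, List.append_assoc]
    · rw [PySem.Dict.getD_modify_of_ne _ _ _ (fun he => h he.symm)]
      simp [h]

-- one line's inner loop over a candidate list: the bucket of p gains one copy of s
-- per occurrence of p in the candidate list (if s matches p)
theorem pvInner_getD (s p : String) :
    ∀ (cands : List String) (d : PySem.Dict String (List String)),
      (cands.foldl (fun d q =>
        if PySem.Str.startswith s q then d.modify q [] (fun vs => vs ++ [s]) else d) d).getD p []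
      = d.getD p [] ++ (if PySem.Str.startswith s p then List.replicate (cands.count p) s else []) := by
  intro cands
  induction cands with
  | nil => intro d; simp
  | cons q rest ih =>
    intro d
    simp only [List.foldl_cons]
    rw [ih]
    by_cases hpq : p = q
    · subst hpq
      rw [List.count_cons_self]
      by_cases hs : PySem.Chars.startswith s.toList p.toList = true
      · simp [hs, PySem.Dict.getD_modify_self, List.replicate_succ]
      · simp [hs]
    · have hstep : (if PySem.Str.startswith s q then d.modify q [] (fun vs => vs ++ [s]) else d).getD p []
          = d.getD p [] := by
        by_cases hs : PySem.Chars.startswith s.toList q.toList = true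
        · simp [hs, PySem.Dict.getD_modify_of_ne _ _ _ hpq]
        · simp [hs]
      rw [hstep]
      have hqp : ¬ q = p := fun h => hpq h.symm
      simp [hqp]

-- the whole line loop, generic in the per-line candidate list
theorem pvLoopGen_getD (c : String → List String) (p : String) :
    ∀ (lines : List String) (d : PySem.Dict String (List String)),
      (lines.foldl (fun d line =>
        let stripped := PySem.Str.strip line
        (c stripped).foldl (fun d q =>
          if PySem.Str.startswith stripped q then d.modify q [] (fun vs => vs ++ [stripped]) else d) d) d).getD p []
      = d.getD p [] ++ lines.flatMap (fun line =>
          let s := PySem.Str.strip line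
          if PySem.Str.startswith s p then List.replicate ((c s).count p) s else []) := by
  intro lines
  induction lines with
  | nil => intro d; simp
  | cons line rest ih =>
    intro d
    simp only [List.foldl_cons, List.flatMap_cons]
    rw [ih, pvInner_getD (PySem.Str.strip line) p (c (PySem.Str.strip line)) d]
    simp [List.append_assoc]

-- the inner loop never changes the key set when every candidate is already a key
theorem pvInner_keys (s : String) :
    ∀ (cands : List String) (d : PySem.Dict String (List String)), (∀ q ∈ cands, q ∈ d.keys) →
      (cands.foldl (fun d q =>
        if PySem.Str.startswith s q then d.modify q [] (fun vs => vs ++ [s]) else d) d).keys = d.keys := by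
  intro cands
  induction cands with
  | nil => intro d _; simp
  | cons q rest ih =>
    intro d hmem
    simp only [List.foldl_cons]
    have hstepkeys : (if PySem.Str.startswith s q then d.modify q [] (fun vs => vs ++ [s]) else d).keys
        = d.keys := by
      by_cases hs : PySem.Chars.startswith s.toList q.toList = true
      · simp only [PySem.Str.startswith_eq, if_pos hs]
        rw [PySem.Dict.keys_modify,
          PySem.Dict.keys_insert_of_contains _ _
            ((PySem.Dict.contains_iff_mem_keys d q).mpr (hmem q (List.mem_cons_self)))]
      · simp [hs]
    rw [ih _ (fun r hr => by rw [hstepkeys]; exact hmem r (List.mem_cons_of_mem _ hr)), hstepkeys]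

theorem pvLoopGen_keys (c : String → List String) :
    ∀ (lines : List String) (d : PySem.Dict String (List String)),
      (∀ s, ∀ q ∈ c s, q ∈ d.keys) →
      (lines.foldl (fun d line =>
        let stripped := PySem.Str.strip line
        (c stripped).foldl (fun d q =>
          if PySem.Str.startswith stripped q then d.modify q [] (fun vs => vs ++ [stripped]) else d) d) d).keys
      = d.keys := by
  intro lines
  induction lines with
  | nil => intro d _; simp
  | cons line rest ih =>
    intro d hmem
    simp only [List.foldl_cons]
    have h1 := pvInner_keys (PySem.Str.strip line) (c (PySem.Str.strip line)) d (hmem _)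
    rw [ih _ (fun s r hr => by rw [h1]; exact hmem s r hr), h1]

-- keys of a fold of inserts from the empty dict: ordered dedup of fps, no duplicates
theorem pvFoldInsert_keys (v : String → List String) (fps : List String) :
    ((fps.foldl (fun d q => d.insert q (v q)) (PySem.Dict.empty : PySem.Dict String (List String)))).keys
      = PySem.Set.update ([] : PySem.Set String) fps := by
  have := PySem.Dict.keys_foldl_insert (ν := List String) fps (fun _ q => v q) PySem.Dict.empty
  simpa using this

theorem pvFoldInsert_keys_nodup (v : String → List String) (fps : List String) :
    ((fps.foldl (fun d q => d.insert q (v q)) (PySem.Dict.empty : PySem.Dict String (List String)))).keys.Nodup :=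
  PySem.Dict.nodup_keys_foldl_insert fps (fun _ q => v q) PySem.Dict.empty PySem.Dict.nodup_keys_empty

-- the first-character groups: lookup in B's index is a filter of fps by key
theorem pvByFirst_getD (fps : List String) (c : String) :
    ((fps.foldl
      (fun d p => d.modify (PySem.Str.slice p (some 0) (some 1)) [] (fun vs => vs ++ [p]))
      (PySem.Dict.empty : PySem.Dict String (List String))).getD c [])
      = fps.filter (fun p => PySem.Str.slice p (some 0) (some 1) == c) := by
  have := pvGroup_getD (fun p => PySem.Str.slice p (some 0) (some 1)) c fps PySem.Dict.empty
  simpa using this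

-- a one-character slice of a string, on the list side
theorem pvSlice_one_toList (s : String) :
    (PySem.Str.slice s (some 0) (some 1)).toList = s.toList.take 1 := by
  rw [PySem.Str.toList_slice, PySem.Chars.slice_eq_listSlice,
    show ((0 : Int)) = ((0 : Nat) : Int) from rfl, show ((1 : Int)) = ((1 : Nat) : Int) from rfl,
    PySem.List.slice_natCast]
  simp

-- if stripped starts with p, p occurs in B's candidate list exactly as often as in fps
theorem pvCands_count (fps : List String) (s p : String)
    (h : PySem.Str.startswith s p = true) :
    ((pvCands
      (fps.foldl
        (fun d p => d.modify (PySem.Str.slice p (some 0) (some 1)) [] (fun vs => vs ++ [p]))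
        PySem.Dict.empty) s).count p) = fps.count p := by
  have hpre : p.toList <+: s.toList := by
    rw [PySem.Str.startswith_eq] at h
    exact (PySem.Chars.startswith_iff _ _).mp h
  unfold pvCands
  rw [pvByFirst_getD, pvByFirst_getD]
  by_cases hp : p.toList = []
  · -- empty prefix: it lives in the "" group and nowhere else
    have hkey : PySem.Str.slice p (some 0) (some 1) = "" := by
      apply String.ext; rw [pvSlice_one_toList, hp]; rfl
    have hc1 : (fps.filter (fun q => PySem.Str.slice q (some 0) (some 1) == "")).count p
        = fps.count p :=
      List.count_filter (by simp [hkey])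
    by_cases hs : s ≠ ""
    · rw [if_pos hs, List.count_append, hc1]
      have hs' : s.toList ≠ [] := fun he => hs (String.ext he)
      have hkey2 : ¬ (PySem.Str.slice p (some 0) (some 1)
          = PySem.Str.slice s (some 0) (some 1)) := by
        intro he
        have := congrArg String.toList he
        rw [pvSlice_one_toList, pvSlice_one_toList, hp] at this
        cases hl : s.toList with
        | nil => exact hs' hl
        | cons a t => rw [hl] at this; simp at this
      have : (fps.filter (fun q => PySem.Str.slice q (some 0) (some 1)
          == PySem.Str.slice s (some 0) (some 1))).count p = 0 :=
        List.count_eq_zero.mpr (fun hmem => hkey2 (by simpa using (List.mem_filter.mp hmem).2))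
      omega
    · rw [if_neg hs, hc1]
  · -- nonempty prefix: s is nonempty and shares its first character with p
    have hs' : s.toList ≠ [] := by
      intro he
      rcases hpre with ⟨t, ht⟩
      rw [he] at ht
      exact hp (List.append_eq_nil_iff.mp ht).1
    have hs : s ≠ "" := fun he => hs' (by rw [he]; rfl)
    rw [if_pos hs, List.count_append]
    have hkeyeq : PySem.Str.slice p (some 0) (some 1) = PySem.Str.slice s (some 0) (some 1) := by
      apply String.ext
      rw [pvSlice_one_toList, pvSlice_one_toList]
      rcases hpre with ⟨t, ht⟩
      rw [← ht, List.take_append]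
      cases hl : p.toList with
      | nil => exact absurd hl hp
      | cons a u => simp
    have hc2 : (fps.filter (fun q => PySem.Str.slice q (some 0) (some 1)
        == PySem.Str.slice s (some 0) (some 1))).count p = fps.count p :=
      List.count_filter (by simp [hkeyeq])
    have hkeyne : ¬ (PySem.Str.slice p (some 0) (some 1) = "") := by
      intro he
      have := congrArg String.toList he
      rw [pvSlice_one_toList] at this
      cases hl : p.toList with
      | nil => exact hp hl
      | cons a u => rw [hl] at this; simp at this
    have hc0 : (fps.filter (fun q => PySem.Str.slice q (some 0) (some 1) == "")).count p = 0 :=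
      List.count_eq_zero.mpr (fun hmem => hkeyne (by simpa using (List.mem_filter.mp hmem).2))
    omega

-- ===== VERDICT (by name: the statement is the Claim_ definition above) =====
theorem extract_preserve_fields_spec : Claim_equal_extract_preserve_fields := by
  intro content fps _
  unfold Spec_extract_preserve_fields extract_preserve_fields extract_preserve_fields_alt
  set lines0 := ((PySem.Str.split? content "\n").getD []) with hlines0
  set d0 := (fps.foldl (fun d p => d.insert p ([] : List String)) PySem.Dict.empty) with hd0
  set bf := (fps.foldl
    (fun d p => d.modify (PySem.Str.slice p (some 0) (some 1)) [] (fun vs => vs ++ [p]))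
    (PySem.Dict.empty : PySem.Dict String (List String))) with hbf
  have hmemk : ∀ q, q ∈ d0.keys ↔ q ∈ fps := by
    intro q
    rw [hd0, pvFoldInsert_keys (fun _ => []) fps]
    simp [PySem.Set.mem_update]
  -- A's loop in generic form
  have hA := pvLoopGen_getD (fun _ => fps)
  have hB := pvLoopGen_getD (fun s => pvCands bf s)
  have hAkeys := pvLoopGen_keys (fun _ => fps) lines0 d0 (fun _ q hq => (hmemk q).mpr hq)
  have hBmem : ∀ s, ∀ q ∈ pvCands bf s, q ∈ d0.keys := by
    intro s q hq
    apply (hmemk q).mpr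
    unfold pvCands at hq
    rw [hbf] at hq
    by_cases hs : s ≠ ""
    · rw [if_pos hs] at hq
      rcases List.mem_append.mp hq with h | h
      · exact List.mem_of_mem_filter (by rw [pvByFirst_getD] at h; exact h)
      · exact List.mem_of_mem_filter (by rw [pvByFirst_getD] at h; exact h)
    · rw [if_neg hs] at hq
      exact List.mem_of_mem_filter (by rw [pvByFirst_getD] at hq; exact hq)
  have hBkeys := pvLoopGen_keys (fun s => pvCands bf s) lines0 d0 hBmem
  have hndA : (lines0.foldl (fun d line =>
      let stripped := PySem.Str.strip line
      fps.foldl (fun d q =>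
        if PySem.Str.startswith stripped q then d.modify q [] (fun vs => vs ++ [stripped]) else d) d) d0).keys.Nodup := by
    rw [hAkeys, hd0]; exact pvFoldInsert_keys_nodup (fun _ => []) fps
  have hndB : (lines0.foldl (fun d line =>
      let stripped := PySem.Str.strip line
      (pvCands bf stripped).foldl (fun d q =>
        if PySem.Str.startswith stripped q then d.modify q [] (fun vs => vs ++ [stripped]) else d) d) d0).keys.Nodup := by
    rw [hBkeys, hd0]; exact pvFoldInsert_keys_nodup (fun _ => []) fps
  rw [PySem.Dict.items_eq_map_keys _ hndA ([] : List String),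
    PySem.Dict.items_eq_map_keys _ hndB ([] : List String), hAkeys, hBkeys]
  apply List.map_congr_left
  intro p hpk
  have hp : p ∈ fps := (hmemk p).mp hpk
  rw [hA p lines0 d0, hB p lines0 d0]
  have hinit : d0.getD p [] = [] := by
    rw [hd0, pvFoldInsert_getD (fun _ => []) p fps PySem.Dict.empty hp]
  rw [hinit]
  have hflat : lines0.flatMap (fun line =>
      let s := PySem.Str.strip line
      if PySem.Str.startswith s p then List.replicate (fps.count p) s else [])
      = lines0.flatMap (fun line =>
      let s := PySem.Str.strip line
      if PySem.Str.startswith s p then List.replicate ((pvCands bf s).count p) s else []) := by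
    apply List.flatMap_congr  -- pointwise equality of the per-line contribution
    intro line _
    by_cases hm : PySem.Str.startswith (PySem.Str.strip line) p = true
    · simp only [hm, if_pos]
      rw [hbf, pvCands_count fps _ p hm]
    · rw [PySem.Str.startswith_eq, PySem.Str.toList_strip] at hm
      simp [hm]
  rw [hflat]
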